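-- pv_equiv track=rewrite | github.com/Keamush/python_home_works | OneSoft/Home_work/Марат/homework5.py | get_dict_of_numbers
-- ===== SOURCE A (Python) =====
-- def get_dict_of_numbers(len_range_end):
--     init_dict = {}
--     for i in range(1, len_range_end + 1):
--         sub_dict = {}
--         for j in range(10):
--             sub_dict[str(j)] = j ** i
--         init_dict[i] = sub_dict
--
--     return init_dict
-- ===== SOURCE B (Python) =====
-- def get_dict_of_numbers(len_range_end):
--     init_dict = {i: {} for i in range(1, len_range_end + 1)}
--     for j in range(10):
--         power = 1
--         for i in range(1, len_range_end + 1):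
--             power *= j
--             init_dict[i][str(j)] = power
--     return init_dict
-- ===== Notes on version B (the rewrite author's own statement) =====
-- stated objective: alternative
-- what changed: Transposed loops (j outer, i inner) with a running product replacing every fresh j**i exponentiation; the outer skeleton of empty sub-dicts is built first so each power is obtained by one multiplication (intended as faster; measured 4.26x at the largest size both finished, unconfirmed beyond).
import Mathlib
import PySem

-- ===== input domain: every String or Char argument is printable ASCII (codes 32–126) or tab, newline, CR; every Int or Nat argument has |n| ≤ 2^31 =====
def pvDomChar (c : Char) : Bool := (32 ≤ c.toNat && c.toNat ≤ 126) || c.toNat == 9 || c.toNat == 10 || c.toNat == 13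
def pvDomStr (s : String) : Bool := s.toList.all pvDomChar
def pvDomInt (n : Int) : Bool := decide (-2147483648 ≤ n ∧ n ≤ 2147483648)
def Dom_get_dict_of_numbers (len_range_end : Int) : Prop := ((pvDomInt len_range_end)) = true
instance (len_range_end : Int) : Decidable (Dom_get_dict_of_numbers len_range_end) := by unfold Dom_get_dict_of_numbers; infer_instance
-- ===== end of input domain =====

-- B transposes the loops (j outer, i inner) and replaces each fresh j ** i by one
-- multiplication of a running product; same return value.

-- ===== PORT A =====
-- 'j ** i' is ported as 'j ^ i.toNat': i ranges over [1, len_range_end+1) so i ≥ 1 and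
-- Python's ** on a nonnegative exponent is exactly monoid power.
def get_dict_of_numbers (len_range_end : Int) : List (Int × List (String × Int)) :=
  ((PySem.List.pyRange 1 (len_range_end + 1) 1).foldl
    (fun (init_dict : PySem.Dict Int (PySem.Dict String Int)) i =>
      init_dict.insert i
        ((PySem.List.pyRange 0 10 1).foldl
          (fun (sub_dict : PySem.Dict String Int) j =>
            sub_dict.insert (PySem.Int.toStr j) (j ^ i.toNat))
          PySem.Dict.empty))
    PySem.Dict.empty).items.map (fun p => (p.1, p.2.items))

-- ===== PORT B =====
def get_dict_of_numbers_alt (len_range_end : Int) : List (Int × List (String × Int)) :=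
  let init_dict : PySem.Dict Int (PySem.Dict String Int) :=
    (PySem.List.pyRange 1 (len_range_end + 1) 1).foldl
      (fun d i => d.insert i PySem.Dict.empty) PySem.Dict.empty
  let filled :=
    (PySem.List.pyRange 0 10 1).foldl
      (fun d j =>
        ((PySem.List.pyRange 1 (len_range_end + 1) 1).foldl
          (fun (s : PySem.Dict Int (PySem.Dict String Int) × Int) i =>
            let power := s.2 * j
            (s.1.modify i PySem.Dict.empty
              (fun sub => sub.insert (PySem.Int.toStr j) power), power))
          (d, 1)).1)
      init_dict
  filled.items.map (fun p => (p.1, p.2.items))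

-- ===== PRECONDITION & SPEC =====
def Spec_get_dict_of_numbers (len_range_end : Int) (out : List (Int × List (String × Int))) : Prop := out = get_dict_of_numbers_alt len_range_end
instance (len_range_end : Int) (out : List (Int × List (String × Int))) : Decidable (Spec_get_dict_of_numbers len_range_end out) := by unfold Spec_get_dict_of_numbers; infer_instance

-- ===== CLAIM (what is proved, stated in full; the proofs are below) =====
def Claim_equal_get_dict_of_numbers : Prop := ∀ (len_range_end : Int), Dom_get_dict_of_numbers len_range_end → Spec_get_dict_of_numbers len_range_end (get_dict_of_numbers len_range_end)

-- ===== LEMMAS AND PROOFS =====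

-- A's inner fold (the sub-dict for row i), used as the common description of both rows.
def pvSub (i : Int) : PySem.Dict String Int :=
  (PySem.List.pyRange 0 10 1).foldl
    (fun (sub_dict : PySem.Dict String Int) j =>
      sub_dict.insert (PySem.Int.toStr j) (j ^ i.toNat))
    PySem.Dict.empty

-- B's inner pass for a fixed j, starting at a with accumulated power j^(a-1):
-- keys are unchanged and every row i in [a, a+k) gains the entry (str j, j^i).
theorem pv_inner (j : Int) : ∀ (k : Nat) (a : Int), 1 ≤ a →
    ∀ (d : PySem.Dict Int (PySem.Dict String Int)),
    (∀ x : Int, a ≤ x → x < a + k → d.contains x = true) →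
    (((PySem.List.pyRange a (a + (k : Int)) 1).foldl
        (fun (s : PySem.Dict Int (PySem.Dict String Int) × Int) i =>
          let power := s.2 * j
          (s.1.modify i PySem.Dict.empty
            (fun sub => sub.insert (PySem.Int.toStr j) power), power))
        (d, j ^ (a - 1).toNat)).1.keys = d.keys ∧
     ∀ i : Int,
      ((PySem.List.pyRange a (a + (k : Int)) 1).foldl
        (fun (s : PySem.Dict Int (PySem.Dict String Int) × Int) i =>
          let power := s.2 * j
          (s.1.modify i PySem.Dict.empty
            (fun sub => sub.insert (PySem.Int.toStr j) power), power))
        (d, j ^ (a - 1).toNat)).1.getD i PySem.Dict.empty =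
        if a ≤ i ∧ i < a + k then
          (d.getD i PySem.Dict.empty).insert (PySem.Int.toStr j) (j ^ i.toNat)
        else d.getD i PySem.Dict.empty) := by
  intro k
  induction k with
  | zero =>
    intro a ha d _
    rw [show a + ((0 : Nat) : Int) = a by omega, PySem.List.pyRange_one_eq_nil le_rfl]
    refine ⟨rfl, fun i => ?_⟩
    rw [if_neg (show ¬ (a ≤ i ∧ i < a) by omega)]
    rfl
  | succ k ih =>
    intro a ha d hcont
    have hlt : a < a + ((k + 1 : Nat) : Int) := by omega
    rw [PySem.List.pyRange_one_cons hlt]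
    simp only [List.foldl_cons]
    have hpow : j ^ (a - 1).toNat * j = j ^ a.toNat := by
      have : a.toNat = (a - 1).toNat + 1 := by omega
      rw [this, pow_succ]
    -- state after processing i = a
    set d' := d.modify a PySem.Dict.empty
        (fun sub => sub.insert (PySem.Int.toStr j) (j ^ (a - 1).toNat * j)) with hd'
    have hconta : d.contains a = true := hcont a le_rfl (by omega)
    have hkeys' : d'.keys = d.keys := by
      rw [hd', PySem.Dict.keys_modify, PySem.Dict.keys_insert_of_contains _ _ hconta]
    have hcont' : ∀ x : Int, a + 1 ≤ x → x < (a + 1) + (k : Int) → d'.contains x = true := by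
      intro x h1 h2
      rw [hd', PySem.Dict.contains_modify]
      have := hcont x (by omega) (by omega)
      simp [this]
    have harg : a + ((k + 1 : Nat) : Int) = (a + 1) + (k : Int) := by omega
    have hpow' : j ^ (a - 1).toNat * j = j ^ ((a + 1) - 1).toNat := by
      rw [hpow]; congr 1; omega
    rw [harg, hpow']
    obtain ⟨ihk, ihg⟩ := ih (a + 1) (by omega) d' hcont'
    refine ⟨by rw [ihk, hkeys'], fun i => ?_⟩
    rw [ihg i]
    by_cases hia : i = a
    · subst hia
      have h1 : ¬ (i + 1 ≤ i ∧ i < i + 1 + (k : Int)) := by omega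
      have h2 : i ≤ i ∧ i < i + 1 + (k : Int) := by omega
      rw [if_neg h1, if_pos h2, hd', PySem.Dict.getD_modify_self, hpow]
    · have hd'i : d'.getD i PySem.Dict.empty = d.getD i PySem.Dict.empty := by
        rw [hd', PySem.Dict.getD_modify_of_ne _ _ _ hia]
      rw [hd'i]
      by_cases hin : a + 1 ≤ i ∧ i < a + 1 + (k : Int)
      · rw [if_pos hin, if_pos ⟨by omega, hin.2⟩]
      · rw [if_neg hin, if_neg (by omega)]

-- B's outer fold over any list of j's: keys unchanged; each row in [1, 1+k) accumulates
-- exactly the inserts of A's inner fold over that list of j's.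
theorem pv_outer (k : Nat) : ∀ (js : List Int) (d : PySem.Dict Int (PySem.Dict String Int)),
    (∀ x : Int, 1 ≤ x → x < 1 + k → d.contains x = true) →
    ((js.foldl
        (fun d j =>
          ((PySem.List.pyRange 1 (1 + (k : Int)) 1).foldl
            (fun (s : PySem.Dict Int (PySem.Dict String Int) × Int) i =>
              let power := s.2 * j
              (s.1.modify i PySem.Dict.empty
                (fun sub => sub.insert (PySem.Int.toStr j) power), power))
            (d, 1)).1)
        d).keys = d.keys ∧
     ∀ i : Int, 1 ≤ i → i < 1 + (k : Int) →
      (js.foldl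
        (fun d j =>
          ((PySem.List.pyRange 1 (1 + (k : Int)) 1).foldl
            (fun (s : PySem.Dict Int (PySem.Dict String Int) × Int) i =>
              let power := s.2 * j
              (s.1.modify i PySem.Dict.empty
                (fun sub => sub.insert (PySem.Int.toStr j) power), power))
            (d, 1)).1)
        d).getD i PySem.Dict.empty =
        js.foldl
          (fun (sub_dict : PySem.Dict String Int) j =>
            sub_dict.insert (PySem.Int.toStr j) (j ^ i.toNat))
          (d.getD i PySem.Dict.empty)) := by
  intro js
  induction js with
  | nil => intro d _; exact ⟨rfl, fun i _ _ => rfl⟩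
  | cons j js ih =>
    intro d hcont
    simp only [List.foldl_cons]
    have hone : (1 : Int) = j ^ ((1 : Int) - 1).toNat := by norm_num
    obtain ⟨hk1, hg1⟩ := by
      have := pv_inner j k 1 le_rfl d hcont
      rw [← hone] at this
      exact this
    set d1 := ((PySem.List.pyRange 1 (1 + (k : Int)) 1).foldl
      (fun (s : PySem.Dict Int (PySem.Dict String Int) × Int) i =>
        let power := s.2 * j
        (s.1.modify i PySem.Dict.empty
          (fun sub => sub.insert (PySem.Int.toStr j) power), power)) (d, 1)).1 with hd1
    have hcont1 : ∀ x : Int, 1 ≤ x → x < 1 + k → d1.contains x = true := by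
      intro x h1 h2
      have hx := hcont x h1 h2
      rw [PySem.Dict.contains_iff_mem_keys] at hx ⊢
      rw [hk1]; exact hx
    obtain ⟨ihk, ihg⟩ := ih d1 hcont1
    refine ⟨by rw [ihk, hk1], fun i h1 h2 => ?_⟩
    rw [ihg i h1 h2, hg1 i, if_pos ⟨h1, h2⟩]

-- A's result: items of the outer fold are the rows in range order.
theorem pv_A_items (n : Int) :
    ((PySem.List.pyRange 1 (n + 1) 1).foldl
      (fun (init_dict : PySem.Dict Int (PySem.Dict String Int)) i =>
        init_dict.insert i
          ((PySem.List.pyRange 0 10 1).foldl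
            (fun (sub_dict : PySem.Dict String Int) j =>
              sub_dict.insert (PySem.Int.toStr j) (j ^ i.toNat))
            PySem.Dict.empty))
      PySem.Dict.empty).items =
    (PySem.List.pyRange 1 (n + 1) 1).map (fun i => (i, pvSub i)) := by
  have := PySem.Dict.items_foldl_insert_fresh (PySem.List.pyRange 1 (n + 1) 1)
    (fun i => i) (fun i => pvSub i) PySem.Dict.empty
    (fun a _ => PySem.Dict.contains_empty a)
    (by simpa using PySem.List.nodup_pyRange_one 1 (n + 1))
  simpa [pvSub] using this

-- B's skeleton: items are (i, empty) in range order.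
theorem pv_skel_items (n : Int) :
    ((PySem.List.pyRange 1 (n + 1) 1).foldl
      (fun (d : PySem.Dict Int (PySem.Dict String Int)) i => d.insert i PySem.Dict.empty)
      PySem.Dict.empty).items =
    (PySem.List.pyRange 1 (n + 1) 1).map (fun i => (i, PySem.Dict.empty)) := by
  have := PySem.Dict.items_foldl_insert_fresh (PySem.List.pyRange 1 (n + 1) 1)
    (fun i => i) (fun _ => (PySem.Dict.empty : PySem.Dict String Int)) PySem.Dict.empty
    (fun a _ => PySem.Dict.contains_empty a)
    (by simpa using PySem.List.nodup_pyRange_one 1 (n + 1))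
  simpa using this

-- ===== VERDICT (by name: the statement is the Claim_ definition above) =====
theorem get_dict_of_numbers_spec : Claim_equal_get_dict_of_numbers := by
  unfold Claim_equal_get_dict_of_numbers Spec_get_dict_of_numbers
  intro n _
  unfold get_dict_of_numbers get_dict_of_numbers_alt
  by_cases hn : n + 1 ≤ 1
  · rw [PySem.List.pyRange_one_eq_nil hn]; rfl
  -- n ≥ 1: write the range end as 1 + k
  have hk : n + 1 = 1 + ((n.toNat : Int)) := by omega
  set skel := ((PySem.List.pyRange 1 (n + 1) 1).foldl
    (fun (d : PySem.Dict Int (PySem.Dict String Int)) i => d.insert i PySem.Dict.empty)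
    PySem.Dict.empty) with hskel
  have hskelitems := pv_skel_items n
  have hskelkeys : skel.keys = PySem.List.pyRange 1 (n + 1) 1 := by
    show skel.items.map (·.1) = _
    rw [← hskel] at hskelitems
    rw [hskelitems, List.map_map]
    exact List.map_id _
  have hnodup : skel.keys.Nodup := by
    rw [hskelkeys]; exact PySem.List.nodup_pyRange_one 1 (n + 1)
  have hskelcont : ∀ x : Int, 1 ≤ x → x < 1 + (n.toNat : Int) → skel.contains x = true := by
    intro x h1 h2
    rw [PySem.Dict.contains_iff_mem_keys, hskelkeys, PySem.List.mem_pyRange_one]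
    omega
  have hskelgetD : ∀ i : Int, i ∈ skel.keys → skel.getD i PySem.Dict.empty = PySem.Dict.empty := by
    intro i hi
    rw [hskelkeys] at hi
    apply PySem.Dict.getD_of_mem_items _ _ hnodup
    rw [← hskel] at hskelitems
    rw [hskelitems]
    exact List.mem_map.2 ⟨i, hi, rfl⟩
  obtain ⟨hkeys, hgetD⟩ := by
    have := pv_outer n.toNat (PySem.List.pyRange 0 10 1) skel (by exact hskelcont)
    rw [← hk] at this
    exact this
  set filled := ((PySem.List.pyRange 0 10 1).foldl
    (fun d j =>
      ((PySem.List.pyRange 1 (n + 1) 1).foldl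
        (fun (s : PySem.Dict Int (PySem.Dict String Int) × Int) i =>
          let power := s.2 * j
          (s.1.modify i PySem.Dict.empty
            (fun sub => sub.insert (PySem.Int.toStr j) power), power))
        (d, 1)).1)
    skel) with hfilled
  have hfkeys : filled.keys = PySem.List.pyRange 1 (n + 1) 1 := by
    rw [hfilled, hkeys, hskelkeys]
  have hfnodup : filled.keys.Nodup := by
    rw [hfkeys]; exact PySem.List.nodup_pyRange_one 1 (n + 1)
  have hfitems := PySem.Dict.items_eq_map_keys filled hfnodup PySem.Dict.empty
  rw [pv_A_items n]
  show _ = filled.items.map (fun p => (p.1, p.2.items))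
  rw [hfitems, hfkeys, List.map_map, List.map_map]
  apply List.map_congr_left
  intro i hi
  have hib := PySem.List.mem_pyRange_one.1 hi
  have : filled.getD i PySem.Dict.empty = pvSub i := by
    rw [hfilled, hgetD i hib.1 (by omega), hskelgetD i (by rw [hskelkeys]; exact hi)]
    rfl
  simp [Function.comp, this]
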